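-- pv_equiv track=rewrite | github.com/thien78/UI | test.py | set_door_status
-- ===== SOURCE A (Python) =====
-- def set_door_status(door_command, current_door_states=None):
--     door_command_map = {
--         'fl_open': ('FrontLeft', 0, 'open'),
--         'fl_close': ('FrontLeft', 0, 'close'),
--         'fl_lock': ('FrontLeft', 1, 'lock'),
--         'fl_unlock': ('FrontLeft', 1, 'unlock'),
--         'fr_open': ('FrontRight', 0, 'open'),
--         'fr_close': ('FrontRight', 0, 'close'),
--         'fr_lock': ('FrontRight', 1, 'lock'),
--         'fr_unlock': ('FrontRight', 1, 'unlock'),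
--         'rl_open': ('RearLeft', 0, 'open'),
--         'rl_close': ('RearLeft', 0, 'close'),
--         'rl_lock': ('RearLeft', 1, 'lock'),
--         'rl_unlock': ('RearLeft', 1, 'unlock'),
--         'rr_open': ('RearRight', 0, 'open'),
--         'rr_close': ('RearRight', 0, 'close'),
--         'rr_lock': ('RearRight', 1, 'lock'),
--         'rr_unlock': ('RearRight', 1, 'unlock'),
--         't_open': ('Trunk', 0, 'open'),
--         't_close': ('Trunk', 0, 'close'),
--         't_lock': ('Trunk', 1, 'lock'),
--         't_unlock': ('Trunk', 1, 'unlock')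
--     }
--
--     door_states = {
--         "FrontLeft": ["close", "lock"],
--         "FrontRight": ["close", "lock"],
--         "RearLeft": ["close", "lock"],
--         "RearRight": ["close", "lock"],
--         "Trunk": ["close", "lock"]
--     }
--
--     if current_door_states:
--         for door, state in current_door_states.items():
--             if door in door_states:
--                 door_states[door] = state
--
--     if door_command not in door_command_map:
--         valid_commands = ', '.join(door_command_map.keys())
--         return False, door_states, "Invalid door command. Valid commands: {}".format(valid_commands)
--
--     door, index, value = door_command_map[door_command]
--     door_state = door_states[door].copy()
--     door_state[index] = value
--     door_states[door] = door_state
--     return True, door_states, "Updated {} state to {}, {}".format(door, door_state[0], door_state[1])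
-- ===== SOURCE B (Python) =====
-- def set_door_status(door_command, current_door_states=None):
--     door_names = {'fl': 'FrontLeft', 'fr': 'FrontRight', 'rl': 'RearLeft', 'rr': 'RearRight', 't': 'Trunk'}
--     slots = {'open': 0, 'close': 0, 'lock': 1, 'unlock': 1}
--
--     door_states = {name: ["close", "lock"] for name in door_names.values()}
--     if current_door_states:
--         for door, state in current_door_states.items():
--             if door in door_states:
--                 door_states[door] = state
--
--     cut = door_command.rfind('_')
--     prefix, action = door_command[:cut], door_command[cut + 1:]
--     if cut < 0 or prefix not in door_names or action not in slots:
--         valid = ', '.join('{}_{}'.format(p, a) for p in door_names for a in slots)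
--         return False, door_states, "Invalid door command. Valid commands: {}".format(valid)
--
--     door = door_names[prefix]
--     state = list(door_states[door])
--     state[slots[action]] = action
--     door_states[door] = state
--     return True, door_states, "Updated {} state to {}, {}".format(door, state[0], state[1])
-- ===== Notes on version B (the rewrite author's own statement) =====
-- stated objective: simpler
-- what changed: B replaces A's hand-written 20-entry command-to-(door,index,value) table by parsing the command at its last underscore and looking the two halves up in a 5-entry prefix map and a 4-entry action map, generating the valid-commands error string from those two maps; the default-state dict and the merge loop are unchanged.
import Mathlib
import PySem

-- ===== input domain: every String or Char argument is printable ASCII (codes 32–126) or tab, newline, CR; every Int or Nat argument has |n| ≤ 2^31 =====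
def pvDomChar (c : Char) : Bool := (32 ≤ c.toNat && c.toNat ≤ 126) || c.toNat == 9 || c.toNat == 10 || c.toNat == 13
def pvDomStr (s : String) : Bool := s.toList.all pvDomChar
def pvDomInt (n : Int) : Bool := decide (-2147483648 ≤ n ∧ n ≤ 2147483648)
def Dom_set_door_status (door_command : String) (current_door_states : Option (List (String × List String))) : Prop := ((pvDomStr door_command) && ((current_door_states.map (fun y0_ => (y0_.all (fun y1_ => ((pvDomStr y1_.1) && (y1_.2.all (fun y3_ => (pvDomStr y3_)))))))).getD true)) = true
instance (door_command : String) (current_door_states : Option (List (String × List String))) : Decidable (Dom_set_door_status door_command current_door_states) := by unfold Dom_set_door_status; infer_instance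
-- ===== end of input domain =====

-- B replaces A's 20-entry command table by parsing the command at its last underscore into a door prefix
-- and an action looked up in two 5- and 4-entry maps (objective: simpler).

-- ===== PORT A =====
-- the literal 20-entry dict of A
def sdsCommandMap : PySem.Dict String (String × Int × String) := PySem.Dict.ofList
  [("fl_open", ("FrontLeft", 0, "open")), ("fl_close", ("FrontLeft", 0, "close")),
   ("fl_lock", ("FrontLeft", 1, "lock")), ("fl_unlock", ("FrontLeft", 1, "unlock")),
   ("fr_open", ("FrontRight", 0, "open")), ("fr_close", ("FrontRight", 0, "close")),
   ("fr_lock", ("FrontRight", 1, "lock")), ("fr_unlock", ("FrontRight", 1, "unlock")),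
   ("rl_open", ("RearLeft", 0, "open")), ("rl_close", ("RearLeft", 0, "close")),
   ("rl_lock", ("RearLeft", 1, "lock")), ("rl_unlock", ("RearLeft", 1, "unlock")),
   ("rr_open", ("RearRight", 0, "open")), ("rr_close", ("RearRight", 0, "close")),
   ("rr_lock", ("RearRight", 1, "lock")), ("rr_unlock", ("RearRight", 1, "unlock")),
   ("t_open", ("Trunk", 0, "open")), ("t_close", ("Trunk", 0, "close")),
   ("t_lock", ("Trunk", 1, "lock")), ("t_unlock", ("Trunk", 1, "unlock"))]

-- A's literal default dict
def sdsDoorStates0 : PySem.Dict String (List String) := PySem.Dict.ofList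
  [("FrontLeft", ["close", "lock"]), ("FrontRight", ["close", "lock"]),
   ("RearLeft", ["close", "lock"]), ("RearRight", ["close", "lock"]), ("Trunk", ["close", "lock"])]

-- 'if current_door_states: for door, state in current_door_states.items(): if door in door_states: …'
def sdsMergeA (current_door_states : Option (List (String × List String)))
    (init : PySem.Dict String (List String)) : PySem.Dict String (List String) :=
  match current_door_states with
  | none => init
  | some l => l.foldl (fun d p => if d.contains p.1 then d.insert p.1 p.2 else d) init

def set_door_status (door_command : String) (current_door_states : Option (List (String × List String))) : Bool × (List (String × List String)) × String :=
  let door_states := sdsMergeA current_door_states sdsDoorStates0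
  match sdsCommandMap.get? door_command with
  | none =>
      (false, door_states.items,
        "Invalid door command. Valid commands: " ++ PySem.Str.join ", " sdsCommandMap.keys)
  | some (door, index, value) =>
      -- door_state = door_states[door].copy(); door_state[index] = value
      -- (pySetD/pyGetD are the total forms; index is in range on every input Pre_ admits)
      let door_state := PySem.List.pySetD (door_states.getD door []) index value
      let door_states := door_states.insert door door_state
      (true, door_states.items,
        "Updated " ++ door ++ " state to " ++ PySem.List.pyGetD door_state 0 "" ++ ", " ++
          PySem.List.pyGetD door_state 1 "")

-- ===== PORT B =====
def sdsDoorNames : PySem.Dict String String := PySem.Dict.ofList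
  [("fl", "FrontLeft"), ("fr", "FrontRight"), ("rl", "RearLeft"), ("rr", "RearRight"), ("t", "Trunk")]

def sdsSlots : PySem.Dict String Int := PySem.Dict.ofList
  [("open", 0), ("close", 0), ("lock", 1), ("unlock", 1)]

-- the same merge loop as in A's Python (B's Python keeps it verbatim)
def sdsMergeB (current_door_states : Option (List (String × List String)))
    (init : PySem.Dict String (List String)) : PySem.Dict String (List String) :=
  match current_door_states with
  | none => init
  | some l => l.foldl (fun d p => if d.contains p.1 then d.insert p.1 p.2 else d) init

def set_door_status_alt (door_command : String) (current_door_states : Option (List (String × List String))) : Bool × (List (String × List String)) × String :=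
  let door_states := sdsMergeB current_door_states
    (sdsDoorNames.values.foldl (fun d n => d.insert n ["close", "lock"]) PySem.Dict.empty)
  let cut := PySem.Str.rfind door_command "_"
  let prefix_ := PySem.Str.slice door_command none (some cut)
  let action := PySem.Str.slice door_command (some (cut + 1)) none
  if cut < 0 || !sdsDoorNames.contains prefix_ || !sdsSlots.contains action then
    (false, door_states.items,
      "Invalid door command. Valid commands: " ++
        PySem.Str.join ", " (sdsDoorNames.keys.flatMap (fun p => sdsSlots.keys.map (fun a => p ++ "_" ++ a))))
  else
    let door := sdsDoorNames.getD prefix_ ""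
    let state := PySem.List.pySetD (door_states.getD door []) (sdsSlots.getD action 0) action
    let door_states := door_states.insert door state
    (true, door_states.items,
      "Updated " ++ door ++ " state to " ++ PySem.List.pyGetD state 0 "" ++ ", " ++
        PySem.List.pyGetD state 1 "")

-- ===== PRECONDITION & SPEC =====
-- Pre_ excludes exactly the inputs on which A raises an IndexError: a valid command whose target
-- door's effective (last-given) state list has fewer than 2 entries.
def Pre_set_door_status (door_command : String) (current_door_states : Option (List (String × List String))) : Prop :=
  ∀ pr ∈ [(("fl" : String), ("FrontLeft" : String)), ("fr", "FrontRight"), ("rl", "RearLeft"),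
          ("rr", "RearRight"), ("t", "Trunk")],
  ∀ ac ∈ [("open" : String), "close", "lock", "unlock"],
    door_command = pr.1 ++ "_" ++ ac →
    ∀ st ∈ ((current_door_states.getD []).reverse.find? (fun q => q.1 == pr.2)).toList,
      2 ≤ st.2.length

instance (door_command : String) (current_door_states : Option (List (String × List String))) : Decidable (Pre_set_door_status door_command current_door_states) := by unfold Pre_set_door_status; infer_instance

def pvWitness_set_door_status : String × (Option (List (String × List String))) :=
  ("t_lock", some [("Trunk", ["open", "unlock"]), ("FrontLeft", ["open", "lock"])])

def Spec_set_door_status (door_command : String) (current_door_states : Option (List (String × List String))) (out : Bool × (List (String × List String)) × String) : Prop := out = set_door_status_alt door_command current_door_states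
instance (door_command : String) (current_door_states : Option (List (String × List String))) (out : Bool × (List (String × List String)) × String) : Decidable (Spec_set_door_status door_command current_door_states out) := by unfold Spec_set_door_status; infer_instance

-- ===== CLAIM (what is proved, stated in full; the proofs are below) =====
def Claim_equal_set_door_status : Prop := ∀ (door_command : String) (current_door_states : Option (List (String × List String))), Dom_set_door_status door_command current_door_states → Pre_set_door_status door_command current_door_states → Spec_set_door_status door_command current_door_states (set_door_status door_command current_door_states)

-- ===== LEMMAS AND PROOFS =====

-- if an underscore occurs at or below position j in s, rfind.go returns a Nat index where it does
lemma sds_rfind_go_spec (s : List Char) (j : Nat) (h : ¬ PySem.Chars.rfind.go s ['_'] j = -1) :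
    ∃ k : Nat, PySem.Chars.rfind.go s ['_'] j = (k : Int) ∧ ['_'].isPrefixOf (s.drop k) = true := by
  induction j with
  | zero =>
      unfold PySem.Chars.rfind.go at h ⊢
      by_cases hp : List.isPrefixOf ['_'] s = true
      · exact ⟨0, by simp [hp], by simpa using hp⟩
      · simp [hp] at h
  | succ j ih =>
      unfold PySem.Chars.rfind.go at h ⊢
      by_cases hp : List.isPrefixOf ['_'] (s.drop (j+1)) = true
      · exact ⟨j+1, by simp [hp], hp⟩
      · simp only [hp] at h ⊢
        simp only [Bool.false_eq_true, if_false]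
        exact ih h

-- when rfind finds an underscore, the string splits around it into the two slices B takes
lemma sds_rfind_decomp (dc : String) (h : 0 ≤ PySem.Str.rfind dc "_") :
    dc = PySem.Str.slice dc none (some (PySem.Str.rfind dc "_")) ++ "_" ++
         PySem.Str.slice dc (some (PySem.Str.rfind dc "_" + 1)) none := by
  have hr : PySem.Str.rfind dc "_" = PySem.Chars.rfind dc.toList ['_'] := PySem.Str.rfind_eq dc "_"
  have hgo : PySem.Chars.rfind dc.toList ['_'] = PySem.Chars.rfind.go dc.toList ['_'] dc.toList.length := rfl
  have hne : ¬ PySem.Chars.rfind.go dc.toList ['_'] dc.toList.length = -1 := by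
    intro he; rw [hr, hgo, he] at h; omega
  obtain ⟨k, hk, hpre⟩ := sds_rfind_go_spec dc.toList dc.toList.length hne
  have hkr : PySem.Str.rfind dc "_" = (k : Int) := by rw [hr, hgo, hk]
  obtain ⟨t, ht⟩ : ∃ t, dc.toList.drop k = '_' :: t := by
    rw [List.isPrefixOf_iff_prefix] at hpre
    obtain ⟨t, ht⟩ := hpre
    exact ⟨t, ht.symm⟩
  apply String.ext
  simp only [String.toList_append, PySem.Str.toList_slice, PySem.Chars.slice_eq_listSlice]
  rw [hkr]
  rw [PySem.List.slice_to _ (by positivity), PySem.List.slice_from _ (by positivity)]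
  have h1 : ((k : Int)).toNat = k := rfl
  have h2 : ((k : Int) + 1).toNat = k + 1 := by omega
  rw [h1, h2]
  have ht2 : dc.toList.drop (k + 1) = t := by
    rw [← List.tail_drop, ht]; rfl
  rw [ht2]
  conv_lhs => rw [← List.take_append_drop k dc.toList]
  rw [ht]
  simp

-- A's 20-entry lookup misses when dc is none of the 20 commands
lemma sds_get_none (dc : String)
    (h1 : ¬("fl_open" : String) = dc) (h2 : ¬("fl_close" : String) = dc)
    (h3 : ¬("fl_lock" : String) = dc) (h4 : ¬("fl_unlock" : String) = dc)
    (h5 : ¬("fr_open" : String) = dc) (h6 : ¬("fr_close" : String) = dc)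
    (h7 : ¬("fr_lock" : String) = dc) (h8 : ¬("fr_unlock" : String) = dc)
    (h9 : ¬("rl_open" : String) = dc) (h10 : ¬("rl_close" : String) = dc)
    (h11 : ¬("rl_lock" : String) = dc) (h12 : ¬("rl_unlock" : String) = dc)
    (h13 : ¬("rr_open" : String) = dc) (h14 : ¬("rr_close" : String) = dc)
    (h15 : ¬("rr_lock" : String) = dc) (h16 : ¬("rr_unlock" : String) = dc)
    (h17 : ¬("t_open" : String) = dc) (h18 : ¬("t_close" : String) = dc)
    (h19 : ¬("t_lock" : String) = dc) (h20 : ¬("t_unlock" : String) = dc) :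
    sdsCommandMap.get? dc = none := by
  have e : sdsCommandMap = PySem.Dict.mk
    [("fl_open", ("FrontLeft", 0, "open")), ("fl_close", ("FrontLeft", 0, "close")),
     ("fl_lock", ("FrontLeft", 1, "lock")), ("fl_unlock", ("FrontLeft", 1, "unlock")),
     ("fr_open", ("FrontRight", 0, "open")), ("fr_close", ("FrontRight", 0, "close")),
     ("fr_lock", ("FrontRight", 1, "lock")), ("fr_unlock", ("FrontRight", 1, "unlock")),
     ("rl_open", ("RearLeft", 0, "open")), ("rl_close", ("RearLeft", 0, "close")),
     ("rl_lock", ("RearLeft", 1, "lock")), ("rl_unlock", ("RearLeft", 1, "unlock")),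
     ("rr_open", ("RearRight", 0, "open")), ("rr_close", ("RearRight", 0, "close")),
     ("rr_lock", ("RearRight", 1, "lock")), ("rr_unlock", ("RearRight", 1, "unlock")),
     ("t_open", ("Trunk", 0, "open")), ("t_close", ("Trunk", 0, "close")),
     ("t_lock", ("Trunk", 1, "lock")), ("t_unlock", ("Trunk", 1, "unlock"))] := rfl
  rw [e]
  simp [PySem.Dict.get?, h1, h2, h3, h4, h5, h6, h7, h8, h9, h10,
        h11, h12, h13, h14, h15, h16, h17, h18, h19, h20]

-- B's prefix membership pins the prefix to one of the 5 names
lemma sds_names_cases (p : String) (h : sdsDoorNames.contains p = true) :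
    p = "fl" ∨ p = "fr" ∨ p = "rl" ∨ p = "rr" ∨ p = "t" := by
  have e : sdsDoorNames = PySem.Dict.mk
    [("fl", "FrontLeft"), ("fr", "FrontRight"), ("rl", "RearLeft"), ("rr", "RearRight"), ("t", "Trunk")] := rfl
  rw [e] at h
  simp [PySem.Dict.contains_mk] at h
  tauto

-- B's action membership pins the action to one of the 4 actions
lemma sds_slots_cases (a : String) (h : sdsSlots.contains a = true) :
    a = "open" ∨ a = "close" ∨ a = "lock" ∨ a = "unlock" := by
  have e : sdsSlots = PySem.Dict.mk
    [("open", 0), ("close", 0), ("lock", 1), ("unlock", 1)] := rfl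
  rw [e] at h
  simp [PySem.Dict.contains_mk] at h
  tauto

-- ===== VERDICT (by name: the statement is the Claim_ definition above) =====
theorem set_door_status_spec : Claim_equal_set_door_status := by
  intro dc cds _hdom _hpre
  unfold Spec_set_door_status
  by_cases h1 : ("fl_open" : String) = dc
  · rw [← h1]; rfl
  by_cases h2 : ("fl_close" : String) = dc
  · rw [← h2]; rfl
  by_cases h3 : ("fl_lock" : String) = dc
  · rw [← h3]; rfl
  by_cases h4 : ("fl_unlock" : String) = dc
  · rw [← h4]; rfl
  by_cases h5 : ("fr_open" : String) = dc
  · rw [← h5]; rfl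
  by_cases h6 : ("fr_close" : String) = dc
  · rw [← h6]; rfl
  by_cases h7 : ("fr_lock" : String) = dc
  · rw [← h7]; rfl
  by_cases h8 : ("fr_unlock" : String) = dc
  · rw [← h8]; rfl
  by_cases h9 : ("rl_open" : String) = dc
  · rw [← h9]; rfl
  by_cases h10 : ("rl_close" : String) = dc
  · rw [← h10]; rfl
  by_cases h11 : ("rl_lock" : String) = dc
  · rw [← h11]; rfl
  by_cases h12 : ("rl_unlock" : String) = dc
  · rw [← h12]; rfl
  by_cases h13 : ("rr_open" : String) = dc
  · rw [← h13]; rfl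
  by_cases h14 : ("rr_close" : String) = dc
  · rw [← h14]; rfl
  by_cases h15 : ("rr_lock" : String) = dc
  · rw [← h15]; rfl
  by_cases h16 : ("rr_unlock" : String) = dc
  · rw [← h16]; rfl
  by_cases h17 : ("t_open" : String) = dc
  · rw [← h17]; rfl
  by_cases h18 : ("t_close" : String) = dc
  · rw [← h18]; rfl
  by_cases h19 : ("t_lock" : String) = dc
  · rw [← h19]; rfl
  by_cases h20 : ("t_unlock" : String) = dc
  · rw [← h20]; rfl
  -- invalid command on both sides
  have hget := sds_get_none dc h1 h2 h3 h4 h5 h6 h7 h8 h9 h10 h11 h12 h13 h14 h15 h16 h17 h18 h19 h20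
  have hguard : (decide (PySem.Str.rfind dc "_" < 0) ||
      !sdsDoorNames.contains (PySem.Str.slice dc none (some (PySem.Str.rfind dc "_"))) ||
      !sdsSlots.contains (PySem.Str.slice dc (some (PySem.Str.rfind dc "_" + 1)) none)) = true := by
    by_contra hg
    simp only [Bool.or_eq_true, not_or, Bool.not_eq_true', Bool.not_eq_false, decide_eq_true_eq] at hg
    obtain ⟨⟨hcut, hp⟩, ha⟩ := hg
    have hdec := sds_rfind_decomp dc (by omega)
    rcases sds_names_cases _ hp with hpe | hpe | hpe | hpe | hpe <;>
      rcases sds_slots_cases _ ha with hae | hae | hae | hae <;>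
      rw [hpe, hae] at hdec <;> simp_all
  simp only [set_door_status, set_door_status_alt, hget, hguard]
  rfl
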